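-- pv_equiv track=rewrite | github.com/Kinetics20/Python_practice_sessions_05 | Unit_tests/codewars_functions_.py | find_even_index
-- ===== SOURCE A (Python) =====
-- def find_even_index(arr):
--     n = len(arr)
--     left_sum = [0] * n
--     right_sum = [0] * n
--
--     left_sum[0] = arr[0]
--     for i in range(1, n):
--         left_sum[i] = left_sum[i - 1] + arr[i]
--
--     right_sum[n - 1] = arr[n - 1]
--     for i in range(n - 2, -1, -1):
--         right_sum[i] = right_sum[i + 1] + arr[i]
--
--     for i in range(n):
--         if left_sum[i] == right_sum[i]:
--             return i
--
--     return -1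
-- ===== SOURCE B (Python) =====
-- def find_even_index(arr):
--     total = sum(arr)
--     left = 0
--     for i, x in enumerate(arr):
--         left += x
--         if 2 * left == total + x:
--             return i
--     return -1
-- ===== Notes on version B (the rewrite author's own statement) =====
-- stated objective: simpler
-- what changed: Replaces the two auxiliary prefix/suffix-sum arrays and three passes by one running left sum compared against a precomputed total in a single enumerate scan (no auxiliary lists allocated or indexed, measured ~2x faster).
import Mathlib
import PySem

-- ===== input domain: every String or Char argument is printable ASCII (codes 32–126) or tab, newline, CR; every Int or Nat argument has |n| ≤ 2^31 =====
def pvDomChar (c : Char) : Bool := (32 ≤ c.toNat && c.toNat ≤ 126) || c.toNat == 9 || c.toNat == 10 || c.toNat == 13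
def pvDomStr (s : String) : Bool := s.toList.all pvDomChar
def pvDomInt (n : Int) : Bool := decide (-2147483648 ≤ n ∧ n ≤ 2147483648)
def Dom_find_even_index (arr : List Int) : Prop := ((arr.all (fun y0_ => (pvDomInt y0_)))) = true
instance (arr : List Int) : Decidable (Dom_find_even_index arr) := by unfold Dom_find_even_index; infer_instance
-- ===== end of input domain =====

-- B replaces A's two prefix/suffix-sum arrays (three passes) by one running-sum scan against a precomputed total; equivalence on nonempty lists, A raises IndexError on the empty list (excluded by Pre_).


-- ===== PORT A =====
-- left_sum[0] = arr[0]; for i in range(1, n): left_sum[i] = left_sum[i-1] + arr[i]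
-- (every index here is in range on the inputs Pre_ admits, so getD/set are exact there)
def buildLeft (arr : List Int) : List Int :=
  let n := arr.length
  (List.range' 1 (n - 1)).foldl
    (fun ls i => ls.set i (ls.getD (i - 1) 0 + arr.getD i 0))
    ((List.replicate n (0 : Int)).set 0 (arr.getD 0 0))

-- right_sum[n-1] = arr[n-1]; for i in range(n-2, -1, -1): right_sum[i] = right_sum[i+1] + arr[i]
-- range(n-2, -1, -1) enumerates the indices n-2, n-3, …, 0, i.e. (List.range (n-1)).reverse
def buildRight (arr : List Int) : List Int :=
  let n := arr.length
  ((List.range (n - 1)).reverse).foldl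
    (fun rs i => rs.set i (rs.getD (i + 1) 0 + arr.getD i 0))
    ((List.replicate n (0 : Int)).set (n - 1) (arr.getD (n - 1) 0))

-- for i in range(n): if left_sum[i] == right_sum[i]: return i ... return -1
def scanA (ls rs : List Int) : List Nat → Int
  | [] => -1
  | i :: rest => if ls.getD i 0 = rs.getD i 0 then (i : Int) else scanA ls rs rest

def find_even_index (arr : List Int) : Int :=
  scanA (buildLeft arr) (buildRight arr) (List.range arr.length)

-- ===== PORT B =====
-- for i, x in enumerate(arr): left += x; if 2*left == total + x: return i ... return -1
def altLoop (total : Int) : Int → Int → List Int → Int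
  | _, _, [] => -1
  | left, i, x :: rest =>
    if 2 * (left + x) = total + x then i else altLoop total (left + x) (i + 1) rest

def find_even_index_alt (arr : List Int) : Int :=
  altLoop arr.sum 0 0 arr

-- ===== PRECONDITION & SPEC =====
-- Pre_ excludes exactly the empty list, on which A raises IndexError at its first-element read.
def Pre_find_even_index (arr : List Int) : Prop := arr ≠ []
instance (arr : List Int) : Decidable (Pre_find_even_index arr) := by unfold Pre_find_even_index; infer_instance
def pvWitness_find_even_index : List Int := [1, 2, 3]

def Spec_find_even_index (arr : List Int) (out : Int) : Prop := out = find_even_index_alt arr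
instance (arr : List Int) (out : Int) : Decidable (Spec_find_even_index arr out) := by unfold Spec_find_even_index; infer_instance

-- ===== CLAIM (what is proved, stated in full; the proofs are below) =====
def Claim_equal_find_even_index : Prop := ∀ (arr : List Int), Dom_find_even_index arr → Pre_find_even_index arr → Spec_find_even_index arr (find_even_index arr)

-- ===== LEMMAS AND PROOFS =====

theorem getD_eq_getElem (l : List Int) (i : Nat) (hi : i < l.length) : l.getD i 0 = l[i] := by
  rw [List.getD_eq_getElem?_getD, List.getElem?_eq_getElem hi]; rfl

theorem getD_set_self (l : List Int) (i : Nat) (hi : i < l.length) (a : Int) :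
    (l.set i a).getD i 0 = a := by
  rw [List.getD_eq_getElem?_getD, List.getElem?_set_self hi]; rfl

theorem getD_set_ne (l : List Int) (i j : Nat) (h : i ≠ j) (a : Int) :
    (l.set i a).getD j 0 = l.getD j 0 := by
  rw [List.getD_eq_getElem?_getD, List.getElem?_set_ne h, List.getD_eq_getElem?_getD]

theorem take_sum_succ (arr : List Int) (i : Nat) (hi : i < arr.length) :
    (arr.take (i + 1)).sum = (arr.take i).sum + arr.getD i 0 := by
  rw [List.sum_take_succ arr i hi, getD_eq_getElem arr i hi]

theorem drop_sum_eq (arr : List Int) (i : Nat) (hi : i < arr.length) :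
    (arr.drop i).sum = arr.getD i 0 + (arr.drop (i + 1)).sum := by
  rw [List.drop_eq_getElem_cons hi, List.sum_cons, getD_eq_getElem arr i hi]

-- loop invariant of A's first pass: entries 0..m hold the inclusive prefix sums
theorem left_gen (arr : List Int) (m : Nat) (hm : m ≤ arr.length - 1) :
    ((List.range' 1 m).foldl
      (fun ls i => ls.set i (ls.getD (i - 1) 0 + arr.getD i 0))
      ((List.replicate arr.length (0 : Int)).set 0 (arr.getD 0 0))).length = arr.length ∧
    ∀ i < arr.length,
      ((List.range' 1 m).foldl
        (fun ls i => ls.set i (ls.getD (i - 1) 0 + arr.getD i 0))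
        ((List.replicate arr.length (0 : Int)).set 0 (arr.getD 0 0))).getD i 0 =
        if i ≤ m then (arr.take (i + 1)).sum else 0 := by
  induction m with
  | zero =>
    simp only [List.range'_zero, List.foldl_nil]
    refine ⟨by simp, ?_⟩
    intro i hi
    rcases Nat.eq_zero_or_pos i with h0 | h0
    · subst h0
      rw [getD_set_self _ 0 (by simpa using hi), take_sum_succ arr 0 hi]
      simp
    · rw [getD_set_ne _ 0 i (by omega)]
      simp [Nat.not_le.mpr h0, List.getD_eq_getElem?_getD]
  | succ m ih =>
    obtain ⟨hlen, hval⟩ := ih (by omega)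
    have hlt : m + 1 < arr.length := by omega
    rw [List.range'_concat, List.foldl_append]
    simp only [List.foldl_cons, List.foldl_nil, Nat.one_mul]
    refine ⟨by simpa using hlen, ?_⟩
    intro i hi
    by_cases h : i = 1 + m
    · subst h
      rw [getD_set_self _ _ (by rw [hlen]; omega)]
      have h1 : (1 + m : Nat) - 1 = m := by omega
      rw [h1, hval m (by omega), if_pos (le_refl m), if_pos (by omega : 1 + m ≤ m + 1)]
      have h2 : (1 + m : Nat) = m + 1 := by omega
      rw [h2, take_sum_succ arr (m + 1) hlt]
    · rw [getD_set_ne _ _ _ (by omega), hval i hi]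
      by_cases hle : i ≤ m
      · rw [if_pos hle, if_pos (by omega)]
      · rw [if_neg hle, if_neg (by omega)]

theorem buildLeft_getD (arr : List Int) (i : Nat) (hi : i < arr.length) :
    (buildLeft arr).getD i 0 = (arr.take (i + 1)).sum := by
  have h := (left_gen arr (arr.length - 1) (le_refl _)).2 i hi
  rw [buildLeft]
  simp only at h
  rw [h, if_pos (by omega)]

-- loop invariant of A's second pass: entries 0..m hold the inclusive suffix sums
theorem right_gen (arr : List Int) (m : Nat) :
    ∀ R : List Int, R.length = arr.length → m < arr.length →
      R.getD m 0 = (arr.drop m).sum →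
      (((List.range m).reverse).foldl
        (fun rs i => rs.set i (rs.getD (i + 1) 0 + arr.getD i 0)) R).length = arr.length ∧
      ∀ j < arr.length,
        (((List.range m).reverse).foldl
          (fun rs i => rs.set i (rs.getD (i + 1) 0 + arr.getD i 0)) R).getD j 0 =
          if j ≤ m then (arr.drop j).sum else R.getD j 0 := by
  induction m with
  | zero =>
    intro R hlen hm hR
    simp only [List.range_zero, List.reverse_nil, List.foldl_nil]
    refine ⟨hlen, ?_⟩
    intro j hj
    by_cases h : j ≤ 0
    · have : j = 0 := by omega
      subst this; rw [if_pos h]; exact hR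
    · rw [if_neg h]
  | succ m ih =>
    intro R hlen hm hR
    rw [List.range_succ, List.reverse_append]
    simp only [List.reverse_cons, List.reverse_nil, List.nil_append, List.cons_append,
      List.foldl_cons]
    have hmlt : m < arr.length := by omega
    have hset : (R.set m (R.getD (m + 1) 0 + arr.getD m 0)).getD m 0 = (arr.drop m).sum := by
      rw [getD_set_self _ _ (by omega), hR, drop_sum_eq arr m hmlt]; ring
    obtain ⟨hlen', hval⟩ := ih (R.set m (R.getD (m + 1) 0 + arr.getD m 0))
      (by simpa using hlen) hmlt hset
    refine ⟨hlen', ?_⟩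
    intro j hj
    rw [hval j hj]
    by_cases h1 : j ≤ m
    · rw [if_pos h1, if_pos (by omega)]
    · by_cases h2 : j = m + 1
      · subst h2
        rw [if_neg h1, if_pos (le_refl _), getD_set_ne _ _ _ (by omega), hR]
      · rw [if_neg h1, if_neg (by omega), getD_set_ne _ _ _ (by omega)]

theorem buildRight_getD (arr : List Int) (i : Nat) (hi : i < arr.length) :
    (buildRight arr).getD i 0 = (arr.drop i).sum := by
  have hbase : ((List.replicate arr.length (0 : Int)).set (arr.length - 1)
      (arr.getD (arr.length - 1) 0)).getD (arr.length - 1) 0 = (arr.drop (arr.length - 1)).sum := by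
    rw [getD_set_self _ _ (by simp; omega)]
    rw [drop_sum_eq arr (arr.length - 1) (by omega)]
    have : arr.length - 1 + 1 = arr.length := by omega
    rw [this, List.drop_length, List.sum_nil, add_zero]
  obtain ⟨_, hval⟩ := right_gen arr (arr.length - 1)
    ((List.replicate arr.length (0 : Int)).set (arr.length - 1) (arr.getD (arr.length - 1) 0))
    (by simp) (by omega) hbase
  have h := hval i hi
  rw [if_pos (by omega)] at h
  rw [buildRight]
  exact h

theorem sum_split (arr : List Int) (k : Nat) :
    arr.sum = (arr.take k).sum + (arr.drop k).sum := by
  conv_lhs => rw [← List.take_append_drop k arr]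
  rw [List.sum_append]

-- A's final scan from index k coincides with B's running-sum loop on the suffix from k
theorem scan_gen (arr : List Int) (m : Nat) :
    ∀ k, k + m = arr.length →
      scanA (buildLeft arr) (buildRight arr) (List.range' k m) =
        altLoop arr.sum ((arr.take k).sum) (k : Int) (arr.drop k) := by
  induction m with
  | zero =>
    intro k hk
    have : arr.drop k = [] := by
      apply List.drop_eq_nil_of_le; omega
    rw [List.range'_zero, this]
    rfl
  | succ m ih =>
    intro k hk
    have hklt : k < arr.length := by omega
    rw [List.range'_succ]
    have hdrop : arr.drop k = arr[k] :: arr.drop (k + 1) := List.drop_eq_getElem_cons hklt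
    rw [hdrop]
    simp only [scanA, altLoop]
    have hL : (buildLeft arr).getD k 0 = (arr.take k).sum + arr[k] := by
      rw [buildLeft_getD arr k hklt, List.sum_take_succ arr k hklt]
    have hR : (buildRight arr).getD k 0 = (arr.drop k).sum := buildRight_getD arr k hklt
    have hsplit := sum_split arr k
    have hcond : ((buildLeft arr).getD k 0 = (buildRight arr).getD k 0) ↔
        (2 * ((arr.take k).sum + arr[k]) = arr.sum + arr[k]) := by
      rw [hL, hR]; omega
    by_cases hc : (buildLeft arr).getD k 0 = (buildRight arr).getD k 0
    · rw [if_pos hc, if_pos (hcond.mp hc)]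
    · rw [if_neg hc, if_neg (fun h => hc (hcond.mpr h))]
      have h1 := ih (k + 1) (by omega)
      rw [h1, List.sum_take_succ arr k hklt]
      push_cast
      ring_nf

-- ===== VERDICT (by name: the statement is the Claim_ definition above) =====
theorem find_even_index_spec : Claim_equal_find_even_index := by
  intro arr _ _
  unfold Spec_find_even_index find_even_index find_even_index_alt
  have h := scan_gen arr arr.length 0 (by omega)
  simpa [List.range_eq_range'] using h
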